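-- pv_equiv track=rewrite | github.com/lianabittencourt/ch11 | id-bmo.py | get_previous_semesters
-- ===== SOURCE A (Python) =====
-- def get_previous_semesters(semester, year):
--     """Função para pegar o semestre atual e os 5 semestres anteriores"""
--
--     semesters = []
--     for _ in range(6):
--         semesters.append((semester, year))
--         if semester == 1:
--             semester = 2
--             year -= 1     # Subtrai o ano ao trocar de 1 para 2
--         else:
--             semester = 1  # Apenas troca o semestre sem alterar o ano
--
--     return semesters
-- ===== SOURCE B (Python) =====
-- def get_previous_semesters(semester, year):
--     """Função para pegar o semestre atual e os 5 semestres anteriores"""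
--
--     def walk_back(s, y, n):
--         if n == 0:
--             return []
--         s2, y2 = (2, y - 1) if s == 1 else (1, y)
--         return [(s, y)] + walk_back(s2, y2, n - 1)
--
--     return walk_back(semester, year, 6)
-- ===== Notes on version B (the rewrite author's own statement) =====
-- stated objective: alternative
-- what changed: Replaces A's imperative loop that mutates (semester, year) state and appends to an accumulator list with a recursive helper that computes the next (semester, year) pair as a value and builds the list front-to-back by consing.
import Mathlib
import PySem

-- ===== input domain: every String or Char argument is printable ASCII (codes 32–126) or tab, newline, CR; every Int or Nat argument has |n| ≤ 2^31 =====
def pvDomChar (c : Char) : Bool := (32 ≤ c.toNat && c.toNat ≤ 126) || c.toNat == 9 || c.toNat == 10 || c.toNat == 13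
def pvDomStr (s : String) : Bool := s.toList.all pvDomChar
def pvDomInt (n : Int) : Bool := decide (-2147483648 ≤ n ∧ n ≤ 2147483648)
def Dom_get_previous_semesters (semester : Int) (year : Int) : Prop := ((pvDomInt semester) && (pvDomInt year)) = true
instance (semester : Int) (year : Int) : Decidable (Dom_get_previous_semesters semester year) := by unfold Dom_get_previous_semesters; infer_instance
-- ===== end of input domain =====

-- B rewrites A's state-mutating append loop as a recursive helper that conses the
-- list front-to-back, computing the next (semester, year) pair as a value (objective: alternative).

-- ===== PORT A =====
def get_previous_semesters (semester : Int) (year : Int) : List (Int × Int) :=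
  -- loop 'for _ in range(6)' over state (semesters, semester, year)
  (((List.range 6).foldl
      (fun (st : List (Int × Int) × Int × Int) _ =>
        let sems := st.1 ++ [(st.2.1, st.2.2)]
        if st.2.1 == 1 then (sems, 2, st.2.2 - 1) else (sems, 1, st.2.2))
      ([], semester, year))).1

-- ===== PORT B =====
def gpsWalkBack (s y : Int) (n : Nat) : List (Int × Int) :=
  match n with
  | 0 => []
  | Nat.succ m =>
    let nxt : Int × Int := if s == 1 then (2, y - 1) else (1, y)
    [(s, y)] ++ gpsWalkBack nxt.1 nxt.2 m

def get_previous_semesters_alt (semester : Int) (year : Int) : List (Int × Int) :=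
  gpsWalkBack semester year 6

-- ===== PRECONDITION & SPEC =====
def Spec_get_previous_semesters (semester : Int) (year : Int) (out : List (Int × Int)) : Prop := out = get_previous_semesters_alt semester year
instance (semester : Int) (year : Int) (out : List (Int × Int)) : Decidable (Spec_get_previous_semesters semester year out) := by unfold Spec_get_previous_semesters; infer_instance

-- ===== CLAIM (what is proved, stated in full; the proofs are below) =====
def Claim_equal_get_previous_semesters : Prop := ∀ (semester : Int) (year : Int), Dom_get_previous_semesters semester year → Spec_get_previous_semesters semester year (get_previous_semesters semester year)

-- ===== LEMMAS AND PROOFS =====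
theorem gps_eq (semester year : Int) :
    get_previous_semesters semester year = get_previous_semesters_alt semester year := by
  by_cases h : semester = 1 <;>
    simp [get_previous_semesters, get_previous_semesters_alt, gpsWalkBack, h, List.range_succ]

-- ===== VERDICT (by name: the statement is the Claim_ definition above) =====
theorem get_previous_semesters_spec : Claim_equal_get_previous_semesters := by
  intro s y _; exact gps_eq s y
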